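-- pv_equiv track=rewrite | github.com/Alea4jacta6est/algorithms_codeforces | 3_binary_search_and_stack/soldier.py | soldiers_can_see
-- ===== SOURCE A (Python) =====
-- def soldiers_can_see(n, seq_growth, directions):
--     result, lstack, rstack = {}, [], []
--     for i in range(n):
--         left_h = seq_growth[i]
--         if directions[i] == "L":
--             result[i] = len(lstack)
--         while len(lstack) and left_h > lstack[-1]:
--             lstack.pop()
--         lstack.append(left_h)
--     for i in range(n - 1, -1, -1):
--         right_h = seq_growth[i]
--         if directions[i] == "R":
--             result[i] = len(rstack)
--         while len(rstack) and right_h > rstack[-1]: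
--             rstack.pop()
--         rstack.append(right_h)
--     return result
-- ===== SOURCE B (Python) =====
-- def soldiers_can_see(n, seq_growth, directions):
--     result = {}
--     for i in range(n):
--         if directions[i] == "L":
--             cnt, cur_max = 0, None
--             for j in range(i - 1, -1, -1):
--                 h = seq_growth[j]
--                 if cur_max is None or h >= cur_max:
--                     cnt += 1
--                     cur_max = h if cur_max is None else max(cur_max, h)
--             result[i] = cnt
--     for i in range(n - 1, -1, -1):
--         if directions[i] == "R":
--             cnt, cur_max = 0, None
--             for j in range(i + 1, n):
--                 h = seq_growth[j]
--                 if cur_max is None or h >= cur_max: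
--                     cnt += 1
--                     cur_max = h if cur_max is None else max(cur_max, h)
--             result[i] = cnt
--     return result
-- ===== Notes on version B (the rewrite author's own statement) =====
-- stated objective: simpler
-- what changed: Replaces the two monotonic stacks with a direct brute-force scan: for each 'L'/'R' soldier, scan outward keeping a running maximum and count soldiers whose height is >= the maximum so far.
import Mathlib
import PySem

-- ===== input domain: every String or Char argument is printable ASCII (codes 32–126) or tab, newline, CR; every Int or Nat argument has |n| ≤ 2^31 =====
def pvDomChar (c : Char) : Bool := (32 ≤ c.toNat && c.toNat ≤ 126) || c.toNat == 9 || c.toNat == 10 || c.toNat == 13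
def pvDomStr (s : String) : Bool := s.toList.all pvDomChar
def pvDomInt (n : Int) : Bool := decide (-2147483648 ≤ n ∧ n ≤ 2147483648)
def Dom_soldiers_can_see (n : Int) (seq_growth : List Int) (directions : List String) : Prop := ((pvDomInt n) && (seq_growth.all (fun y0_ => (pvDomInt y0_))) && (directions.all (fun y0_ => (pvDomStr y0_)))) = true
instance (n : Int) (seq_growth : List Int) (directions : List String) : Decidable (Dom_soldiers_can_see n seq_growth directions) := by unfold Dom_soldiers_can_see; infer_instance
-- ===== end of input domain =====

-- B replaces A's two monotonic stacks by a direct brute-force running-max scan per soldier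
-- (objective: simpler; O(n^2) instead of A's O(n), same return value).

-- ===== PORT A =====
-- the stack is modelled top-first: Python's lstack[-1] is the head, append is cons
-- (exact inside Pre_: indices produced by range(n)/range(n-1,-1,-1) are then in bounds,
--  so pyGetD's default is never taken).
def pvPopA (h : Int) (st : List Int) : List Int :=
  match st with
  | [] => []
  | t :: r => if t < h then pvPopA h r else t :: r

def pvLoopA (seq : List Int) (dirs : List String) (tag : String) (idxs : List Int)
    (res : PySem.Dict Int Int) (st : List Int) : PySem.Dict Int Int × List Int :=
  match idxs with
  | [] => (res, st)
  | i :: rest =>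
    let h := PySem.List.pyGetD seq i 0
    let res' := if PySem.List.pyGetD dirs i "" = tag then res.insert i (st.length : Int) else res
    pvLoopA seq dirs tag rest res' (h :: pvPopA h st)

def soldiers_can_see (n : Int) (seq_growth : List Int) (directions : List String) : List (Int × Int) :=
  let r1 := pvLoopA seq_growth directions "L" (PySem.List.pyRange 0 n 1) PySem.Dict.empty []
  let r2 := pvLoopA seq_growth directions "R" (PySem.List.pyRange (n - 1) (-1) (-1)) r1.1 []
  r2.1.items

-- ===== PORT B =====
def pvCountB (seq : List Int) (js : List Int) (cnt : Int) (curMax : Option Int) : Int :=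
  match js with
  | [] => cnt
  | j :: rest =>
    let h := PySem.List.pyGetD seq j 0
    match curMax with
    | none => pvCountB seq rest (cnt + 1) (some h)
    | some v => if v ≤ h then pvCountB seq rest (cnt + 1) (some (max v h)) else pvCountB seq rest cnt (some v)

def pvLoopB (seq : List Int) (dirs : List String) (tag : String) (scan : Int → List Int)
    (idxs : List Int) (res : PySem.Dict Int Int) : PySem.Dict Int Int :=
  match idxs with
  | [] => res
  | i :: rest =>
    let res' := if PySem.List.pyGetD dirs i "" = tag then res.insert i (pvCountB seq (scan i) 0 none) else res
    pvLoopB seq dirs tag scan rest res'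

def soldiers_can_see_alt (n : Int) (seq_growth : List Int) (directions : List String) : List (Int × Int) :=
  let r1 := pvLoopB seq_growth directions "L" (fun i => PySem.List.pyRange (i - 1) (-1) (-1))
              (PySem.List.pyRange 0 n 1) PySem.Dict.empty
  let r2 := pvLoopB seq_growth directions "R" (fun i => PySem.List.pyRange (i + 1) n 1)
              (PySem.List.pyRange (n - 1) (-1) (-1)) r1
  r2.items

-- ===== PRECONDITION & SPEC =====
-- Python A indexes seq_growth[i] and directions[i] for every 0 ≤ i < n, so it raises
-- IndexError unless n ≤ 0 or n is at most both lengths; Pre_ admits exactly the inputs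
-- where A returns.
def Pre_soldiers_can_see (n : Int) (seq_growth : List Int) (directions : List String) : Prop :=
  n ≤ 0 ∨ (n ≤ (seq_growth.length : Int) ∧ n ≤ (directions.length : Int))
instance (n : Int) (seq_growth : List Int) (directions : List String) : Decidable (Pre_soldiers_can_see n seq_growth directions) := by unfold Pre_soldiers_can_see; infer_instance
def pvWitness_soldiers_can_see : Int × List Int × List String := (3, [2, 1, 2], ["L", "R", "X"])

def Spec_soldiers_can_see (n : Int) (seq_growth : List Int) (directions : List String) (out : List (Int × Int)) : Prop := out = soldiers_can_see_alt n seq_growth directions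
instance (n : Int) (seq_growth : List Int) (directions : List String) (out : List (Int × Int)) : Decidable (Spec_soldiers_can_see n seq_growth directions out) := by unfold Spec_soldiers_can_see; infer_instance

-- ===== CLAIM (what is proved, stated in full; the proofs are below) =====
def Claim_equal_soldiers_can_see : Prop := ∀ (n : Int) (seq_growth : List Int) (directions : List String), Dom_soldiers_can_see n seq_growth directions → Pre_soldiers_can_see n seq_growth directions → Spec_soldiers_can_see n seq_growth directions (soldiers_can_see n seq_growth directions)

-- ===== LEMMAS AND PROOFS =====

-- the monotonic-stack push, and the stack built from a list of heights (oldest first)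
def pvPush (st : List Int) (h : Int) : List Int := h :: pvPopA h st
def pvStack (p : List Int) : List Int := p.foldl pvPush []

-- B's scan, expressed on the list of heights it visits (most recent first)
def pvBscan (xs : List Int) (m : Option Int) : Int :=
  match xs, m with
  | [], _ => 0
  | x :: r, none => 1 + pvBscan r (some x)
  | x :: r, some v => if v ≤ x then 1 + pvBscan r (some (max v x)) else pvBscan r (some v)

def pvCountGe (m : Option Int) (s : List Int) : Int :=
  match m with
  | none => (s.length : Int)
  | some v => ((s.filter (fun x => v ≤ x)).length : Int)

theorem pvPopA_eq_filter (h : Int) (st : List Int) (hs : st.Pairwise (· ≤ ·)) :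
    pvPopA h st = st.filter (fun x => h ≤ x) := by
  induction st with
  | nil => rfl
  | cons t r ih =>
    rcases List.pairwise_cons.mp hs with ⟨hall, hr⟩
    by_cases hlt : t < h
    · simp [pvPopA, hlt, not_le.mpr hlt, ih hr]
    · have hle : h ≤ t := not_lt.mp hlt
      simp only [pvPopA, if_neg hlt, List.filter_cons, decide_eq_true_eq, if_pos hle]
      have : r.filter (fun x => h ≤ x) = r := List.filter_eq_self.mpr
        (fun x hx => by exact decide_eq_true (le_trans hle (hall x hx)))
      simp [this]

theorem pvPush_sorted (st : List Int) (h : Int) (hs : st.Pairwise (· ≤ ·)) :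
    (pvPush st h).Pairwise (· ≤ ·) := by
  rw [pvPush, pvPopA_eq_filter h st hs, List.pairwise_cons]
  refine ⟨fun x hx => ?_, hs.sublist List.filter_sublist⟩
  have := List.of_mem_filter hx
  exact of_decide_eq_true this

theorem pvStack_sorted (p : List Int) : (pvStack p).Pairwise (· ≤ ·) := by
  suffices hgen : ∀ (q : List Int) (st : List Int), st.Pairwise (· ≤ ·) →
      (q.foldl pvPush st).Pairwise (· ≤ ·) from hgen p [] List.Pairwise.nil
  intro q
  induction q with
  | nil => intro st hs; exact hs
  | cons x r ih => intro st hs; exact ih _ (pvPush_sorted st x hs)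

theorem pvStack_append (p : List Int) (h : Int) : pvStack (p ++ [h]) = pvPush (pvStack p) h := by
  simp [pvStack, List.foldl_append]

theorem pvFilter2 (v h : Int) (s : List Int) :
    (s.filter (fun x => h ≤ x)).filter (fun x => v ≤ x) = s.filter (fun x => max v h ≤ x) := by
  rw [List.filter_filter]
  apply List.filter_congr
  intro x _
  simp [Bool.decide_and]

theorem pvBscan_reverse (p : List Int) : ∀ m, pvBscan p.reverse m = pvCountGe m (pvStack p) := by
  induction p using List.reverseRecOn with
  | nil => intro m; cases m <;> simp [pvBscan, pvCountGe, pvStack]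
  | append_singleton q h ih =>
    intro m
    rw [pvStack_append, List.reverse_append, List.reverse_singleton, List.singleton_append]
    have hpop := pvPopA_eq_filter h (pvStack q) (pvStack_sorted q)
    cases m with
    | none =>
      show 1 + pvBscan q.reverse (some h) = ((pvPush (pvStack q) h).length : Int)
      rw [ih (some h), pvPush, hpop]
      simp [pvCountGe]
      omega
    | some v =>
      show (if v ≤ h then 1 + pvBscan q.reverse (some (max v h)) else pvBscan q.reverse (some v)) =
        pvCountGe (some v) (pvPush (pvStack q) h)
      rw [pvPush, hpop]
      by_cases hv : v ≤ h
      · rw [if_pos hv, ih (some (max v h))]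
        simp only [pvCountGe, List.filter_cons, decide_eq_true_eq, if_pos hv, List.length_cons,
          pvFilter2]
        omega
      · rw [if_neg hv, ih (some v)]
        have hmax : max v h = v := max_eq_left (le_of_lt (not_le.mp hv))
        simp only [pvCountGe, List.filter_cons, decide_eq_true_eq, if_neg hv, pvFilter2, hmax]

theorem pvCountB_eq_bscan (seq : List Int) (js : List Int) :
    ∀ cnt m, pvCountB seq js cnt m = cnt + pvBscan (js.map (fun j => PySem.List.pyGetD seq j 0)) m := by
  induction js with
  | nil => intro cnt m; simp [pvCountB, pvBscan]
  | cons j rest ih =>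
    intro cnt m
    cases m with
    | none => rw [List.map_cons]; show pvCountB seq rest (cnt + 1) _ = _; rw [ih]; show _ = cnt + (1 + _); ring
    | some v =>
      rw [List.map_cons]
      show (if v ≤ PySem.List.pyGetD seq j 0 then pvCountB seq rest (cnt + 1) _ else pvCountB seq rest cnt _) = _
      by_cases hv : v ≤ PySem.List.pyGetD seq j 0
      · rw [if_pos hv, ih]; show _ = cnt + (if _ then _ else _); rw [if_pos hv]; ring
      · rw [if_neg hv, ih]; show _ = cnt + (if _ then _ else _); rw [if_neg hv]

theorem pvLoopL_eq (seq : List Int) (dirs : List String) (n : Int) :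
    ∀ (k : Nat) (a : Int) (res : PySem.Dict Int Int), 0 ≤ a → (n - a).toNat = k →
      (pvLoopA seq dirs "L" (PySem.List.pyRange a n 1) res
        (pvStack ((PySem.List.pyRange 0 a 1).map (fun j => PySem.List.pyGetD seq j 0)))).1 =
      pvLoopB seq dirs "L" (fun i => PySem.List.pyRange (i - 1) (-1) (-1))
        (PySem.List.pyRange a n 1) res := by
  intro k
  induction k with
  | zero =>
    intro a res ha hk
    rw [PySem.List.pyRange_one_eq_nil (by omega)]
    rfl
  | succ k ih =>
    intro a res ha hk
    by_cases han : a < n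
    · rw [PySem.List.pyRange_one_cons han]
      simp only [pvLoopA, pvLoopB]
      have hval : pvCountB seq (PySem.List.pyRange (a - 1) (-1) (-1)) 0 none =
          ((pvStack ((PySem.List.pyRange 0 a 1).map (fun j => PySem.List.pyGetD seq j 0))).length : Int) := by
        rw [pvCountB_eq_bscan]
        have hr : PySem.List.pyRange (a - 1) (-1) (-1) = (PySem.List.pyRange 0 a 1).reverse := by
          have := PySem.List.pyRange_neg_one_eq_reverse (a - 1) (-1)
          simpa using this
        rw [hr, List.map_reverse, pvBscan_reverse]
        simp [pvCountGe]
      rw [hval]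
      have hst : (PySem.List.pyGetD seq a 0 ::
            pvPopA (PySem.List.pyGetD seq a 0)
              (pvStack ((PySem.List.pyRange 0 a 1).map (fun j => PySem.List.pyGetD seq j 0)))) =
          pvStack ((PySem.List.pyRange 0 (a + 1) 1).map (fun j => PySem.List.pyGetD seq j 0)) := by
        rw [PySem.List.pyRange_one_succ_right (by omega : (0:Int) ≤ a), List.map_append,
          List.map_singleton, pvStack_append]
        rfl
      rw [hst]
      exact ih (a + 1) _ (by omega) (by omega)
    · rw [PySem.List.pyRange_one_eq_nil (by omega)]
      rfl

theorem pvLoopR_eq (seq : List Int) (dirs : List String) (n : Int) :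
    ∀ (k : Nat) (a : Int) (res : PySem.Dict Int Int), a < n → (a + 1).toNat = k →
      (pvLoopA seq dirs "R" (PySem.List.pyRange a (-1) (-1)) res
        (pvStack ((PySem.List.pyRange (n - 1) a (-1)).map (fun j => PySem.List.pyGetD seq j 0)))).1 =
      pvLoopB seq dirs "R" (fun i => PySem.List.pyRange (i + 1) n 1)
        (PySem.List.pyRange a (-1) (-1)) res := by
  intro k
  induction k with
  | zero =>
    intro a res ha hk
    rw [PySem.List.pyRange_neg_one_eq_nil (by omega)]
    rfl
  | succ k ih =>
    intro a res ha hk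
    have ha0 : (-1 : Int) < a := by omega
    rw [PySem.List.pyRange_neg_one_cons ha0]
    simp only [pvLoopA, pvLoopB]
    have hval : pvCountB seq (PySem.List.pyRange (a + 1) n 1) 0 none =
        ((pvStack ((PySem.List.pyRange (n - 1) a (-1)).map (fun j => PySem.List.pyGetD seq j 0))).length : Int) := by
      rw [pvCountB_eq_bscan]
      have hr : PySem.List.pyRange (a + 1) n 1 = (PySem.List.pyRange (n - 1) a (-1)).reverse := by
        have := PySem.List.pyRange_neg_one_eq_reverse (n - 1) a
        rw [this, List.reverse_reverse]
        congr 1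
        omega
      rw [hr, List.map_reverse, pvBscan_reverse]
      simp [pvCountGe]
    rw [hval]
    have hst : (PySem.List.pyGetD seq a 0 ::
          pvPopA (PySem.List.pyGetD seq a 0)
            (pvStack ((PySem.List.pyRange (n - 1) a (-1)).map (fun j => PySem.List.pyGetD seq j 0)))) =
        pvStack ((PySem.List.pyRange (n - 1) (a - 1) (-1)).map (fun j => PySem.List.pyGetD seq j 0)) := by
      have hsplit : PySem.List.pyRange (n - 1) (a - 1) (-1) = PySem.List.pyRange (n - 1) a (-1) ++ [a] := by
        rw [PySem.List.pyRange_neg_one_eq_reverse (n - 1) (a - 1),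
          PySem.List.pyRange_neg_one_eq_reverse (n - 1) a]
        have h1 : a - 1 + 1 = a := by omega
        have h2 : n - 1 + 1 = n := by omega
        rw [h1, h2, PySem.List.pyRange_one_cons ha, List.reverse_cons]
      rw [hsplit, List.map_append, List.map_singleton, pvStack_append]
      rfl
    rw [hst]
    exact ih (a - 1) _ (by omega) (by omega)

-- ===== VERDICT (by name: the statement is the Claim_ definition above) =====
theorem soldiers_can_see_spec : Claim_equal_soldiers_can_see := by
  intro n seq dirs _ _
  unfold Spec_soldiers_can_see
  simp only [soldiers_can_see, soldiers_can_see_alt]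
  have e0 : pvStack ((PySem.List.pyRange 0 0 1).map (fun j => PySem.List.pyGetD seq j 0)) = [] := by
    rw [PySem.List.pyRange_one_eq_nil le_rfl]; rfl
  have eR : pvStack ((PySem.List.pyRange (n - 1) (n - 1) (-1)).map (fun j => PySem.List.pyGetD seq j 0)) = [] := by
    rw [PySem.List.pyRange_neg_one_eq_nil le_rfl]; rfl
  have h1 : (pvLoopA seq dirs "L" (PySem.List.pyRange 0 n 1) PySem.Dict.empty []).1 =
      pvLoopB seq dirs "L" (fun i => PySem.List.pyRange (i - 1) (-1) (-1))
        (PySem.List.pyRange 0 n 1) PySem.Dict.empty := by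
    have := pvLoopL_eq seq dirs n (n - 0).toNat 0 PySem.Dict.empty le_rfl rfl
    rwa [e0] at this
  have h2 : (pvLoopA seq dirs "R" (PySem.List.pyRange (n - 1) (-1) (-1))
        (pvLoopB seq dirs "L" (fun i => PySem.List.pyRange (i - 1) (-1) (-1))
          (PySem.List.pyRange 0 n 1) PySem.Dict.empty) []).1 =
      pvLoopB seq dirs "R" (fun i => PySem.List.pyRange (i + 1) n 1)
        (PySem.List.pyRange (n - 1) (-1) (-1))
        (pvLoopB seq dirs "L" (fun i => PySem.List.pyRange (i - 1) (-1) (-1))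
          (PySem.List.pyRange 0 n 1) PySem.Dict.empty) := by
    have := pvLoopR_eq seq dirs n (n - 1 + 1).toNat (n - 1)
      (pvLoopB seq dirs "L" (fun i => PySem.List.pyRange (i - 1) (-1) (-1))
        (PySem.List.pyRange 0 n 1) PySem.Dict.empty) (by omega) rfl
    rwa [eR] at this
  rw [h1, h2]
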